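-- pv_equiv track=rewrite | github.com/ahmadmdm/material_ledger | material_ledger/material_ledger/services/ai_prediction_service.py | _add_months_to_date
-- ===== SOURCE A (Python) =====
-- def _add_months_to_date(date_str, months):
--     """Add months to date string"""
--     try:
--         year, month = map(int, date_str.split('-'))
--         month += months
--         while month > 12:
--             month -= 12
--             year += 1
--         return f"{year}-{month:02d}"
--     except:
--         return date_str
-- ===== SOURCE B (Python) =====
-- def _add_months_to_date(date_str, months):
--     """Add months to date string"""
--     try:
--         year, month = map(int, date_str.split('-'))
--         month += months
--         if month > 12:
--             extra, rem = divmod(month - 1, 12)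
--             year += extra
--             month = rem + 1
--         return f"{year}-{month:02d}"
--     except:
--         return date_str
-- ===== Notes on version B (the rewrite author's own statement) =====
-- stated objective: simpler
-- what changed: The while month>12 loop (one year per iteration) is replaced by a single guarded closed-form divmod(month-1, 12) normalization.
import Mathlib
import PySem

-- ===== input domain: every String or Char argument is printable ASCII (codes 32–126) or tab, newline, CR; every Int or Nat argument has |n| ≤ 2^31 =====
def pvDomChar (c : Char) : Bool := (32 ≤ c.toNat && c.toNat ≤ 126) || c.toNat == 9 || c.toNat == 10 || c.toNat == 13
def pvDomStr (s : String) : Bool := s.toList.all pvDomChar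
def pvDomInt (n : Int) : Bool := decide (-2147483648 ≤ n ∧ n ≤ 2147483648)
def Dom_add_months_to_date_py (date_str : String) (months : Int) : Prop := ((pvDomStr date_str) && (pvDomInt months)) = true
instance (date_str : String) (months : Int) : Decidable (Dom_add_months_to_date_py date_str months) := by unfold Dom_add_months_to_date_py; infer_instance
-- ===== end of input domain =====

-- B replaces A's while-loop year carry (one iteration per excess year) by one guarded
-- closed-form divmod normalization; parsing and formatting are identical in both Pythons.

-- shared helpers (identical code in both Pythons): parse "Y-M" and format f"{m:02d}"
-- `year, month = map(int, date_str.split('-'))`: exactly two '-'-fields, both int()-parsable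
def pvParseYM (s : String) : Option (Int × Int) :=
  match PySem.Str.split? s "-" with
  | some [a, b] =>
    match PySem.Int.ofStr? a, PySem.Int.ofStr? b with
    | some y, some m => some (y, m)
    | _, _ => none
  | _ => none

-- f"{m:02d}": zero-pad to width 2 (only single-digit non-negatives are shorter than 2)
def pvFmt02d (m : Int) : String :=
  if 0 ≤ m ∧ m < 10 then "0" ++ PySem.Int.toStr m else PySem.Int.toStr m

-- ===== PORT A =====
-- `while month > 12: month -= 12; year += 1`
def pvNormLoop (year month : Int) : Int × Int :=
  if 12 < month then pvNormLoop (year + 1) (month - 12) else (year, month)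
termination_by month.toNat
decreasing_by omega

def add_months_to_date_py (date_str : String) (months : Int) : String :=
  match pvParseYM date_str with
  | none => date_str
  | some (year, month) =>
    let p := pvNormLoop year (month + months)
    PySem.Int.toStr p.1 ++ "-" ++ pvFmt02d p.2

-- ===== PORT B =====
def add_months_to_date_py_alt (date_str : String) (months : Int) : String :=
  match pvParseYM date_str with
  | none => date_str
  | some (year, month) =>
    let m := month + months
    if 12 < m then
      let extra := PySem.Int.floordiv (m - 1) 12
      let rem := PySem.Int.mod (m - 1) 12
      PySem.Int.toStr (year + extra) ++ "-" ++ pvFmt02d (rem + 1)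
    else
      PySem.Int.toStr year ++ "-" ++ pvFmt02d m

-- ===== PRECONDITION & SPEC =====
def Spec_add_months_to_date_py (date_str : String) (months : Int) (out : String) : Prop := out = add_months_to_date_py_alt date_str months
instance (date_str : String) (months : Int) (out : String) : Decidable (Spec_add_months_to_date_py date_str months out) := by unfold Spec_add_months_to_date_py; infer_instance

-- ===== CLAIM (what is proved, stated in full; the proofs are below) =====
def Claim_equal_add_months_to_date_py : Prop := ∀ (date_str : String) (months : Int), Dom_add_months_to_date_py date_str months → Spec_add_months_to_date_py date_str months (add_months_to_date_py date_str months)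

-- ===== LEMMAS AND PROOFS =====

-- A's carry loop computes B's guarded closed form
theorem pvNormLoop_eq (y m : Int) :
    pvNormLoop y m =
      if 12 < m then (y + (m - 1) / 12, (m - 1) % 12 + 1) else (y, m) := by
  induction y, m using pvNormLoop.induct with
  | case1 y m h ih =>
    rw [pvNormLoop, if_pos h, ih]
    split_ifs with h2 <;> refine Prod.ext ?_ ?_ <;> simp <;> omega
  | case2 y m h =>
    rw [pvNormLoop, if_neg h, if_neg h]

-- ===== VERDICT (by name: the statement is the Claim_ definition above) =====
theorem add_months_to_date_py_spec : Claim_equal_add_months_to_date_py := by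
  intro date_str months _
  unfold Spec_add_months_to_date_py add_months_to_date_py add_months_to_date_py_alt
  cases h : pvParseYM date_str with
  | none => rfl
  | some ym =>
    obtain ⟨y, m⟩ := ym
    simp only [pvNormLoop_eq, PySem.Int.floordiv_eq_ediv_of_pos (b := 12) (by norm_num),
      PySem.Int.mod_eq_emod_of_pos (b := 12) (by norm_num)]
    split_ifs <;> rfl
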